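-- pv_equiv track=rewrite | github.com/rohitashbishnoi91/recruiit | rule_base/core/job_title.py | calculate_related_group_score
-- ===== SOURCE A (Python) =====
-- def calculate_related_group_score(jd_groups, candidate_groups):
--     """Calculate similarity between related role groups"""
--
--     # Define related groups with similarity scores
--     related_groups = {
--         "python_development": {"software_development": 85, "backend_development": 80, "data_science": 60},
--         "software_development": {"backend_development": 80, "frontend_development": 80, "python_development": 85},
--         "backend_development": {"software_development": 80, "python_development": 80, "devops_sre": 60},
--         "frontend_development": {"software_development": 80, "mobile_development": 60, "design": 40},
--         "data_science": {"machine_learning": 70, "python_development": 60, "research": 60},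
--         "machine_learning": {"data_science": 70, "research": 60, "software_development": 50},
--         "devops_sre": {"backend_development": 60, "software_development": 50},
--         "product_management": {"consulting": 40, "technical_leadership": 30},
--         "quality_assurance": {"software_development": 40, "backend_development": 50},
--         "mobile_development": {"software_development": 70, "frontend_development": 60}
--     }
--
--     max_related_score = 0
--     for jd_group in jd_groups:
--         for candidate_group in candidate_groups:
--             if jd_group in related_groups and candidate_group in related_groups[jd_group]:
--                 max_related_score = max(max_related_score, related_groups[jd_group][candidate_group])
--             elif candidate_group in related_groups and jd_group in related_groups[candidate_group]:
--                 max_related_score = max(max_related_score, related_groups[candidate_group][jd_group])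
--
--     return max_related_score
-- ===== SOURCE B (Python) =====
-- # B: scan a flat, precomputed symmetric edge list with set membership, instead of
-- # A's nested loop over the jd x candidate cross-product with dict lookups.
-- # Correct because the table scores both orientations identically wherever both exist.
-- EDGES = [
--     ('python_development', 'software_development', 85),
--     ('python_development', 'backend_development', 80),
--     ('python_development', 'data_science', 60),
--     ('software_development', 'backend_development', 80),
--     ('software_development', 'frontend_development', 80),
--     ('software_development', 'python_development', 85),
--     ('backend_development', 'software_development', 80),
--     ('backend_development', 'python_development', 80),
--     ('backend_development', 'devops_sre', 60),
--     ('frontend_development', 'software_development', 80),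
--     ('frontend_development', 'mobile_development', 60),
--     ('frontend_development', 'design', 40),
--     ('data_science', 'machine_learning', 70),
--     ('data_science', 'python_development', 60),
--     ('data_science', 'research', 60),
--     ('machine_learning', 'data_science', 70),
--     ('machine_learning', 'research', 60),
--     ('machine_learning', 'software_development', 50),
--     ('devops_sre', 'backend_development', 60),
--     ('devops_sre', 'software_development', 50),
--     ('product_management', 'consulting', 40),
--     ('product_management', 'technical_leadership', 30),
--     ('quality_assurance', 'software_development', 40),
--     ('quality_assurance', 'backend_development', 50),
--     ('mobile_development', 'software_development', 70),
--     ('mobile_development', 'frontend_development', 60),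
-- ]
--
--
-- def calculate_related_group_score(jd_groups, candidate_groups):
--     """Calculate similarity between related role groups"""
--     jd = set(jd_groups)
--     cand = set(candidate_groups)
--     scores = [s for a, b, s in EDGES
--               if (a in jd and b in cand) or (b in jd and a in cand)]
--     return max(scores, default=0)
-- ===== Notes on version B (the rewrite author's own statement) =====
-- stated objective: faster
-- what changed: B replaces A's nested loop over the jd x candidate cross-product with dict lookups per pair by a single comprehension over a precomputed flat symmetric edge list, filtered by set membership, finished with max(..., default=0); valid because the table scores both orientations identically wherever both are present.
import Mathlib
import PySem

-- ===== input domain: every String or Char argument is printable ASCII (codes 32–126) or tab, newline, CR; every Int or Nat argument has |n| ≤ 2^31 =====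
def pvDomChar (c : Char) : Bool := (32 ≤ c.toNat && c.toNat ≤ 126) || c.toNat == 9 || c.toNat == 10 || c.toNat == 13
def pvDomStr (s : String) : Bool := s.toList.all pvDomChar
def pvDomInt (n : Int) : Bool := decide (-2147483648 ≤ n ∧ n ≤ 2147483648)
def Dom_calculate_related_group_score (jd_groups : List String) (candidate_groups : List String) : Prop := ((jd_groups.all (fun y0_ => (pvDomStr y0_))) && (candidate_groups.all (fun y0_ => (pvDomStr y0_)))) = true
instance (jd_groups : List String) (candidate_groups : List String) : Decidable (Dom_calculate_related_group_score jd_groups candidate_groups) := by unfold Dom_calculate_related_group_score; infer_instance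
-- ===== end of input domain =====

-- B scans a flat precomputed symmetric edge list once with set membership instead of A's
-- nested loop over the jd x candidate cross-product with dict lookups (objective: faster).

-- ===== PORT A =====
-- A's module-level nested dict literal
def relatedGroups : PySem.Dict String (PySem.Dict String Int) :=
  PySem.Dict.ofList [
    ("python_development", PySem.Dict.ofList [("software_development", 85), ("backend_development", 80), ("data_science", 60)]),
    ("software_development", PySem.Dict.ofList [("backend_development", 80), ("frontend_development", 80), ("python_development", 85)]),
    ("backend_development", PySem.Dict.ofList [("software_development", 80), ("python_development", 80), ("devops_sre", 60)]),
    ("frontend_development", PySem.Dict.ofList [("software_development", 80), ("mobile_development", 60), ("design", 40)]),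
    ("data_science", PySem.Dict.ofList [("machine_learning", 70), ("python_development", 60), ("research", 60)]),
    ("machine_learning", PySem.Dict.ofList [("data_science", 70), ("research", 60), ("software_development", 50)]),
    ("devops_sre", PySem.Dict.ofList [("backend_development", 60), ("software_development", 50)]),
    ("product_management", PySem.Dict.ofList [("consulting", 40), ("technical_leadership", 30)]),
    ("quality_assurance", PySem.Dict.ofList [("software_development", 40), ("backend_development", 50)]),
    ("mobile_development", PySem.Dict.ofList [("software_development", 70), ("frontend_development", 60)])]

-- 'j in rg and c in rg[j]' followed by the indexing 'rg[j][c]' is exactly the bind of the two get?s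
def calculate_related_group_score (jd_groups : List String) (candidate_groups : List String) : Int :=
  jd_groups.foldl (fun acc jd_group =>
    candidate_groups.foldl (fun acc candidate_group =>
      match (relatedGroups.get? jd_group).bind (fun d => d.get? candidate_group) with
      | some s => max acc s
      | none =>
        match (relatedGroups.get? candidate_group).bind (fun d => d.get? jd_group) with
        | some s => max acc s
        | none => acc) acc) 0

-- ===== PORT B =====
-- B's module-level flat edge-list literal EDGES
def rgEdgesB : List (String × String × Int) := [
  ("python_development", "software_development", 85),
  ("python_development", "backend_development", 80),
  ("python_development", "data_science", 60),
  ("software_development", "backend_development", 80),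
  ("software_development", "frontend_development", 80),
  ("software_development", "python_development", 85),
  ("backend_development", "software_development", 80),
  ("backend_development", "python_development", 80),
  ("backend_development", "devops_sre", 60),
  ("frontend_development", "software_development", 80),
  ("frontend_development", "mobile_development", 60),
  ("frontend_development", "design", 40),
  ("data_science", "machine_learning", 70),
  ("data_science", "python_development", 60),
  ("data_science", "research", 60),
  ("machine_learning", "data_science", 70),
  ("machine_learning", "research", 60),
  ("machine_learning", "software_development", 50),
  ("devops_sre", "backend_development", 60),
  ("devops_sre", "software_development", 50),
  ("product_management", "consulting", 40),
  ("product_management", "technical_leadership", 30),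
  ("quality_assurance", "software_development", 40),
  ("quality_assurance", "backend_development", 50),
  ("mobile_development", "software_development", 70),
  ("mobile_development", "frontend_development", 60)]

-- the comprehension is filter-then-map; max(scores, default=0) is PySem.List.max? with default 0
def calculate_related_group_score_alt (jd_groups : List String) (candidate_groups : List String) : Int :=
  let jd := PySem.Set.ofList jd_groups
  let cand := PySem.Set.ofList candidate_groups
  let scores := (rgEdgesB.filter (fun e =>
      (jd.contains e.1 && cand.contains e.2.1) || (jd.contains e.2.1 && cand.contains e.1))).map
      (fun e => e.2.2)
  match PySem.List.max? scores (fun x => x) with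
  | some m => m
  | none => 0

-- ===== PRECONDITION & SPEC =====
def Spec_calculate_related_group_score (jd_groups : List String) (candidate_groups : List String) (out : Int) : Prop := out = calculate_related_group_score_alt jd_groups candidate_groups
instance (jd_groups : List String) (candidate_groups : List String) (out : Int) : Decidable (Spec_calculate_related_group_score jd_groups candidate_groups out) := by unfold Spec_calculate_related_group_score; infer_instance

-- ===== CLAIM (what is proved, stated in full; the proofs are below) =====
def Claim_equal_calculate_related_group_score : Prop := ∀ (jd_groups : List String) (candidate_groups : List String), Dom_calculate_related_group_score jd_groups candidate_groups → Spec_calculate_related_group_score jd_groups candidate_groups (calculate_related_group_score jd_groups candidate_groups)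

-- ===== LEMMAS AND PROOFS =====

-- the score A assigns to one (jd_group, candidate_group) pair (0 when unrelated)
def gA (j c : String) : Int :=
  match (relatedGroups.get? j).bind (fun d => d.get? c) with
  | some s => s
  | none =>
    match (relatedGroups.get? c).bind (fun d => d.get? j) with
    | some s => s
    | none => 0

def condB (jd cand : List String) (e : String × String × Int) : Bool :=
  ((PySem.Set.ofList jd).contains e.1 && (PySem.Set.ofList cand).contains e.2.1) ||
  ((PySem.Set.ofList jd).contains e.2.1 && (PySem.Set.ofList cand).contains e.1)

def hB (jd cand : List String) (e : String × String × Int) : Int :=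
  if condB jd cand e then e.2.2 else 0

-- generic facts about folds of the shape  acc ↦ max acc (g x)
theorem maxfold_le_iff {α : Type} (g : α → Int) (l : List α) :
    ∀ (b m : Int), l.foldl (fun a x => max a (g x)) b ≤ m ↔ b ≤ m ∧ ∀ x ∈ l, g x ≤ m := by
  induction l with
  | nil => simp
  | cons y t ih =>
    intro b m
    simp only [List.foldl_cons, ih, max_le_iff, List.mem_cons]
    constructor
    · rintro ⟨⟨hb, hy⟩, ht⟩
      exact ⟨hb, fun x hx => by rcases hx with rfl | hx; exact hy; exact ht x hx⟩
    · rintro ⟨hb, h⟩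
      exact ⟨⟨hb, h y (Or.inl rfl)⟩, fun x hx => h x (Or.inr hx)⟩

theorem le_maxfold_base {α : Type} (g : α → Int) (l : List α) (b : Int) :
    b ≤ l.foldl (fun a x => max a (g x)) b :=
  ((maxfold_le_iff g l b _).mp le_rfl).1

theorem le_maxfold_mem {α : Type} (g : α → Int) (l : List α) (b : Int) {x : α} (hx : x ∈ l) :
    g x ≤ l.foldl (fun a x => max a (g x)) b :=
  ((maxfold_le_iff g l b _).mp le_rfl).2 x hx

-- A's inner loop body equals  acc ↦ max acc (gA j c)  whenever 0 ≤ acc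
theorem stepA_eq (j c : String) (acc : Int) (h : 0 ≤ acc) :
    (match (relatedGroups.get? j).bind (fun d => d.get? c) with
     | some s => max acc s
     | none =>
       match (relatedGroups.get? c).bind (fun d => d.get? j) with
       | some s => max acc s
       | none => acc) = max acc (gA j c) := by
  unfold gA
  cases (relatedGroups.get? j).bind (fun d => d.get? c) with
  | some s => rfl
  | none =>
    cases (relatedGroups.get? c).bind (fun d => d.get? j) with
    | some s => rfl
    | none => simpa using (max_eq_left h).symm

theorem innerA_eq (j : String) (cand : List String) :
    ∀ acc : Int, 0 ≤ acc →
      cand.foldl (fun acc c =>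
        match (relatedGroups.get? j).bind (fun d => d.get? c) with
        | some s => max acc s
        | none =>
          match (relatedGroups.get? c).bind (fun d => d.get? j) with
          | some s => max acc s
          | none => acc) acc
      = cand.foldl (fun a c => max a (gA j c)) acc := by
  induction cand with
  | nil => intro acc _; rfl
  | cons c t ih =>
    intro acc h
    simp only [List.foldl_cons, stepA_eq j c acc h]
    exact ih _ (le_trans h (le_max_left _ _))

theorem outerA_eq (jd cand : List String) :
    ∀ acc : Int, 0 ≤ acc →
      jd.foldl (fun acc jd_group =>
        cand.foldl (fun acc candidate_group =>
          match (relatedGroups.get? jd_group).bind (fun d => d.get? candidate_group) with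
          | some s => max acc s
          | none =>
            match (relatedGroups.get? candidate_group).bind (fun d => d.get? jd_group) with
            | some s => max acc s
            | none => acc) acc) acc
      = jd.foldl (fun a j => cand.foldl (fun a c => max a (gA j c)) a) acc := by
  induction jd with
  | nil => intro acc _; rfl
  | cons j t ih =>
    intro acc h
    simp only [List.foldl_cons, innerA_eq j cand acc h]
    exact ih _ (le_trans h (le_maxfold_base _ cand acc))

-- the directed edge list A's table flattens to; it is exactly B's literal
def rgEdges : List (String × String × Int) :=
  relatedGroups.items.flatMap (fun p => p.2.items.map (fun q => (p.1, q.1, q.2)))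

theorem edges_eq : rgEdges = rgEdgesB := by decide

-- max over a list of nonnegatives, with default 0, is the running-max fold from 0
theorem max_default_eq (xs : List Int) (hpos : ∀ x ∈ xs, 0 ≤ x) :
    (match PySem.List.max? xs (fun x => x) with
     | some m => m
     | none => 0) = xs.foldl max 0 := by
  cases xs with
  | nil => rfl
  | cons x t =>
    rw [PySem.List.max?_id_cons]
    have : max 0 x = x := max_eq_right (hpos x (List.mem_cons_self))
    simp [this]

-- folding max over the filtered-mapped list = folding the guarded max over the whole list
theorem filter_map_fold (p : (String × String × Int) → Bool) (l : List (String × String × Int)) :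
    ∀ acc : Int, ((l.filter p).map (fun e => e.2.2)).foldl max acc
      = l.foldl (fun a e => if p e then max a e.2.2 else a) acc := by
  induction l with
  | nil => intro acc; rfl
  | cons e t ih =>
    intro acc
    by_cases hp : p e <;> simp [hp, ih]

-- the guarded-max body equals  a ↦ max a (hB jd cand e)  whenever 0 ≤ acc
theorem guard_eq (jd cand : List String) (l : List (String × String × Int)) :
    ∀ acc : Int, 0 ≤ acc →
      l.foldl (fun a e => if condB jd cand e then max a e.2.2 else a) acc
      = l.foldl (fun a e => max a (hB jd cand e)) acc := by
  induction l with
  | nil => intro acc _; rfl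
  | cons e t ih =>
    intro acc h
    simp only [List.foldl_cons, hB]
    by_cases hc : condB jd cand e
    · rw [show (if condB jd cand e = true then max acc e.2.2 else acc) = max acc e.2.2 from by simp [hc],
        show max acc (if condB jd cand e = true then e.2.2 else 0) = max acc e.2.2 from by simp [hc]]
      exact ih _ (le_trans h (le_max_left _ _))
    · rw [show (if condB jd cand e = true then max acc e.2.2 else acc) = acc from by simp [hc],
        show max acc (if condB jd cand e = true then e.2.2 else 0) = acc from by simp [hc, max_eq_left h]]
      exact ih _ h

-- flattening a nested fold
theorem foldl_flatMap {α β γ : Type} (l : List α) (f : α → List β) (step : γ → β → γ) (init : γ) :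
    (l.flatMap f).foldl step init = l.foldl (fun a x => (f x).foldl step a) init := by
  induction l generalizing init with
  | nil => rfl
  | cons x t ih => simp [List.flatMap_cons, List.foldl_append, ih]

-- membership through PySem.Set.ofList / contains
theorem contains_ofList_iff (xs : List String) (x : String) :
    (PySem.Set.ofList xs).contains x = true ↔ x ∈ xs := by
  simp [PySem.Set.contains]

-- the table's symmetry: each directed edge is scored identically in both orientations by A
theorem edge_gA : ∀ e ∈ rgEdges, gA e.1 e.2.1 = e.2.2 ∧ gA e.2.1 e.1 = e.2.2 := by decide

theorem edge_nonneg : ∀ e ∈ rgEdgesB, (0 : Int) ≤ e.2.2 := by decide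

-- a pair A scores nonzero corresponds to an edge B fires on, with the same score
theorem gA_mem_edge {j c : String} {s : Int}
    (h : gA j c = s) (hs : s ≠ 0) :
    ((j, c, s) ∈ rgEdges ∨ (c, j, s) ∈ rgEdges) := by
  unfold gA at h
  cases hfwd : (relatedGroups.get? j).bind (fun d => d.get? c) with
  | some v =>
    left
    rw [hfwd] at h
    rcases Option.bind_eq_some_iff.mp hfwd with ⟨d, hd, hdc⟩
    have h1 := PySem.Dict.mem_items_of_get?_eq_some relatedGroups hd
    have h2 := PySem.Dict.mem_items_of_get?_eq_some d hdc
    subst h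
    exact List.mem_flatMap.mpr ⟨(j, d), h1, List.mem_map.mpr ⟨(c, v), h2, rfl⟩⟩
  | none =>
    rw [hfwd] at h
    cases hrev : (relatedGroups.get? c).bind (fun d => d.get? j) with
    | some v =>
      right
      rw [hrev] at h
      rcases Option.bind_eq_some_iff.mp hrev with ⟨d, hd, hdj⟩
      have h1 := PySem.Dict.mem_items_of_get?_eq_some relatedGroups hd
      have h2 := PySem.Dict.mem_items_of_get?_eq_some d hdj
      subst h
      exact List.mem_flatMap.mpr ⟨(c, d), h1, List.mem_map.mpr ⟨(j, v), h2, rfl⟩⟩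
    | none => rw [hrev] at h; exact absurd h.symm hs

-- the core identity: max over scored pairs = max over fired edges
theorem core_eq (jd cand : List String) :
    (jd.flatMap (fun j => cand.map (fun c => (j, c)))).foldl
      (fun a p => max a (gA p.1 p.2)) 0
    = rgEdges.foldl (fun a e => max a (hB jd cand e)) 0 := by
  apply le_antisymm
  · rw [maxfold_le_iff]
    refine ⟨le_maxfold_base _ _ _, ?_⟩
    intro p hp
    rcases List.mem_flatMap.mp hp with ⟨j', hj, hm⟩
    rcases List.mem_map.mp hm with ⟨c', hc, rfl⟩
    simp only
    by_cases hz : gA j' c' = 0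
    · rw [hz]; exact le_maxfold_base _ _ _
    · rcases gA_mem_edge rfl hz with he | he
      · refine le_trans (le_of_eq ?_) (le_maxfold_mem _ rgEdges 0 he)
        have : condB jd cand (j', c', gA j' c') = true := by
          simp only [condB, Bool.or_eq_true, Bool.and_eq_true]
          exact Or.inl ⟨(contains_ofList_iff jd j').mpr hj, (contains_ofList_iff cand c').mpr hc⟩
        simp [hB, this]
      · refine le_trans (le_of_eq ?_) (le_maxfold_mem _ rgEdges 0 he)
        have : condB jd cand (c', j', gA j' c') = true := by
          simp only [condB, Bool.or_eq_true, Bool.and_eq_true]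
          exact Or.inr ⟨(contains_ofList_iff jd j').mpr hj, (contains_ofList_iff cand c').mpr hc⟩
        simp [hB, this]
  · rw [maxfold_le_iff]
    refine ⟨le_maxfold_base _ _ _, ?_⟩
    intro e he
    by_cases hc : condB jd cand e
    · have hbe : hB jd cand e = e.2.2 := by simp [hB, hc]
      have hce := edge_gA e he
      rw [hbe]
      have hc' := hc
      simp only [condB, Bool.or_eq_true, Bool.and_eq_true] at hc'
      rcases hc' with ⟨h1, h2⟩ | ⟨h1, h2⟩
      · have hj := (contains_ofList_iff jd e.1).mp h1
        have hcc := (contains_ofList_iff cand e.2.1).mp h2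
        have hp : (e.1, e.2.1) ∈ jd.flatMap (fun j => cand.map (fun c => (j, c))) :=
          List.mem_flatMap.mpr ⟨e.1, hj, List.mem_map.mpr ⟨e.2.1, hcc, rfl⟩⟩
        have hle := le_maxfold_mem (fun p => gA p.1 p.2) _ 0 hp
        simp only at hle
        rw [← hce.1]
        exact hle
      · have hj := (contains_ofList_iff jd e.2.1).mp h1
        have hcc := (contains_ofList_iff cand e.1).mp h2
        have hp : (e.2.1, e.1) ∈ jd.flatMap (fun j => cand.map (fun c => (j, c))) :=
          List.mem_flatMap.mpr ⟨e.2.1, hj, List.mem_map.mpr ⟨e.1, hcc, rfl⟩⟩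
        have hle := le_maxfold_mem (fun p => gA p.1 p.2) _ 0 hp
        simp only at hle
        rw [← hce.2]
        exact hle
    · have hbe : hB jd cand e = 0 := by simp [hB, hc]
      rw [hbe]
      exact le_maxfold_base _ _ _

-- B's port unfolded to the guarded fold over the edge list
theorem alt_eq (jd cand : List String) :
    calculate_related_group_score_alt jd cand
    = rgEdges.foldl (fun a e => max a (hB jd cand e)) 0 := by
  unfold calculate_related_group_score_alt
  rw [max_default_eq _ (by
    intro x hx
    rcases List.mem_map.mp hx with ⟨e, he, rfl⟩
    exact edge_nonneg e (List.mem_of_mem_filter he))]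
  rw [filter_map_fold, ← edges_eq]
  exact guard_eq jd cand rgEdges 0 le_rfl

-- ===== VERDICT (by name: the statement is the Claim_ definition above) =====
theorem calculate_related_group_score_spec : Claim_equal_calculate_related_group_score := by
  intro jd cand _
  unfold Spec_calculate_related_group_score
  rw [alt_eq]
  unfold calculate_related_group_score
  rw [outerA_eq jd cand 0 le_rfl, ← core_eq jd cand, foldl_flatMap]
  simp only [List.foldl_map]
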